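-- pv_equiv track=rewrite | github.com/dantasse/neighborhood_guides | util/tweetutil.py | is_spammer
-- ===== SOURCE A (Python) =====
-- spammers = ['rachelmeemken', 'rg_ep', 'teensteem', 'ladacciillumina', 'sydwalsh_', 'jackbranan',]
--
-- def is_spammer(username):
--     username_lower = username.lower()
--     for jobword in ['job', 'career', 'tmj', 'join', 'workat', 'recruit', 'soliant']:
--         if jobword in username_lower:
--             return True
--     if username_lower in spammers:
--         return True
--     return False
-- ===== SOURCE B (Python) =====
-- spammers = ['rachelmeemken', 'rg_ep', 'teensteem', 'ladacciillumina', 'sydwalsh_', 'jackbranan']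
--
-- _keywords = ['job', 'career', 'tmj', 'join', 'workat', 'recruit', 'soliant']
--
-- def is_spammer(username):
--     u = username.lower()
--     # single left-to-right scan: at each position, does some keyword start here?
--     for i in range(len(u)):
--         if any(u.startswith(k, i) for k in _keywords):
--             return True
--     return u in spammers
-- ===== Notes on version B (the rewrite author's own statement) =====
-- stated objective: alternative
-- what changed: A makes one substring pass over the string per keyword and then a list-membership check; B makes a single left-to-right scan over the string, testing at each position whether any keyword starts there, followed by the exact-match check.
import Mathlib
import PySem

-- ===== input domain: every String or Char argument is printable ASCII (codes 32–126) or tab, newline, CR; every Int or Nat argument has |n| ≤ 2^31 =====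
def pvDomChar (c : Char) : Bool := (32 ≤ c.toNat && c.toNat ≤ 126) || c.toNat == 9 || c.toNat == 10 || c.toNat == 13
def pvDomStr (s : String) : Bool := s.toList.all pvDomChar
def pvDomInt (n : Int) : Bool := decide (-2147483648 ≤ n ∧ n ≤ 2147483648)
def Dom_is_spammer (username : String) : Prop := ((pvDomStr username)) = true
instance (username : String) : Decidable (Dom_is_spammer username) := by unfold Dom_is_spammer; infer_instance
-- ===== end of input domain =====

-- B replaces A's per-keyword substring passes by a single positional scan over the string; alternative structure, same cost.


def pvSpammers : List String := ["rachelmeemken", "rg_ep", "teensteem", "ladacciillumina", "sydwalsh_", "jackbranan"]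

-- ===== PORT A =====
-- the for-loop with early return, then the membership check and the final returns
def pvALoop (ul : String) : List String → Bool
  | [] => if pvSpammers.contains ul then true else false
  | k :: ks => if PySem.Str.isIn k ul then true else pvALoop ul ks

def is_spammer (username : String) : Bool :=
  let username_lower := PySem.Str.lower username
  pvALoop username_lower ["job", "career", "tmj", "join", "workat", "recruit", "soliant"]

-- ===== PORT B =====
def pvKeywords : List String := ["job", "career", "tmj", "join", "workat", "recruit", "soliant"]

-- for i in range(len(u)): if any(u.startswith(k, i) for k in _keywords): return True
def pvBScan : List Char → Bool
  | [] => false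
  | c :: rest =>
      if pvKeywords.any (fun k => PySem.Chars.startswith (c :: rest) k.toList) then true
      else pvBScan rest

def is_spammer_alt (username : String) : Bool :=
  let u := PySem.Str.lower username
  if pvBScan u.toList then true else pvSpammers.contains u

-- ===== PRECONDITION & SPEC =====
def Spec_is_spammer (username : String) (out : Bool) : Prop := out = is_spammer_alt username
instance (username : String) (out : Bool) : Decidable (Spec_is_spammer username out) := by unfold Spec_is_spammer; infer_instance

-- ===== CLAIM (what is proved, stated in full; the proofs are below) =====
def Claim_equal_is_spammer : Prop := ∀ (username : String), Dom_is_spammer username → Spec_is_spammer username (is_spammer username)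

-- ===== LEMMAS AND PROOFS =====

-- A's loop is: some keyword occurs as substring, or the name is in the spammer list
theorem pvALoop_eq (ul : String) (ks : List String) :
    pvALoop ul ks = (ks.any (fun k => PySem.Str.isIn k ul) || pvSpammers.contains ul) := by
  induction ks with
  | nil => simp [pvALoop]
  | cons k ks ih =>
      simp [pvALoop, ih, Bool.or_assoc]

-- B's scan is true iff some keyword starts at some position
theorem pvBScan_iff (l : List Char) :
    pvBScan l = true ↔ ∃ j, pvKeywords.any (fun k => PySem.Chars.startswith (l.drop j) k.toList) = true := by
  induction l with
  | nil =>
      have h : pvKeywords.any (fun k => PySem.Chars.startswith [] k.toList) = false := by decide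
      simp [pvBScan, h]
  | cons c rest ih =>
      simp only [pvBScan]
      by_cases h : pvKeywords.any (fun k => PySem.Chars.startswith (c :: rest) k.toList) = true
      · simp only [h, if_true, true_iff]
        exact ⟨0, by simpa using h⟩
      · rw [if_neg h, ih]
        constructor
        · rintro ⟨j, hj⟩; exact ⟨j + 1, by simpa using hj⟩
        · rintro ⟨j, hj⟩
          match j with
          | 0 => exact absurd (by simpa using hj) h
          | j + 1 => exact ⟨j, by simpa using hj⟩

-- substring search per keyword = positional scan, for the fixed keyword list
theorem any_isIn_eq_scan (u : String) :
    pvKeywords.any (fun k => PySem.Str.isIn k u) = pvBScan u.toList := by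
  rcases h : pvBScan u.toList with _ | _
  · rw [List.any_eq_false]
    intro k hk
    simp only [Bool.not_eq_true]
    rw [← Bool.not_eq_true] at h ⊢
    intro hin
    apply h
    rw [pvBScan_iff]
    have : k.toList <:+: u.toList := (PySem.Str.isIn_iff_infix k u).mp hin
    obtain ⟨j, hpre⟩ := (PySem.Chars.exists_prefix_drop_iff_isIn k.toList u.toList).mpr
      ((PySem.Chars.isIn_iff_infix _ _).mpr this)
    exact ⟨j, List.any_eq_true.mpr ⟨k, hk, (PySem.Chars.startswith_iff _ _).mpr hpre⟩⟩
  · obtain ⟨j, hj⟩ := (pvBScan_iff u.toList).mp h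
    obtain ⟨k, hk, hks⟩ := List.any_eq_true.mp hj
    rw [List.any_eq_true]
    refine ⟨k, hk, ?_⟩
    rw [PySem.Str.isIn_iff_infix, ← PySem.Chars.isIn_iff_infix,
      ← PySem.Chars.exists_prefix_drop_iff_isIn]
    exact ⟨j, (PySem.Chars.startswith_iff _ _).mp hks⟩

-- ===== VERDICT (by name: the statement is the Claim_ definition above) =====
theorem is_spammer_spec : Claim_equal_is_spammer := by
  intro username _
  unfold Spec_is_spammer is_spammer is_spammer_alt
  rw [pvALoop_eq,
    show (["job", "career", "tmj", "join", "workat", "recruit", "soliant"] : List String) = pvKeywords from rfl,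
    any_isIn_eq_scan]
  rcases h : pvBScan (PySem.Chars.lower username.toList) <;>
    simp [PySem.Str.toList_lower, h]
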